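-- pv_equiv track=rewrite | github.com/Mao-Hao/KD | src/kd2/core/expr/sympy_bridge.py | _fold_funcall
-- ===== SOURCE A (Python) =====
-- from collections.abc import Callable, Sequence
--
-- def _fold_funcall(name: str, args: Sequence[str]) -> str:
--     """Fold a list of arguments into nested binary funcalls."""
--     if not args:
--         raise ValueError(f"Cannot fold empty argument list for {name}")
--     if len(args) == 1:
--         return args[0]
--     result = args[-1]
--     for arg in reversed(args[:-1]):
--         result = f"{name}({arg}, {result})"
--     return result
-- ===== SOURCE B (Python) =====
-- def _fold_funcall(name, args):
--     """Fold a list of arguments into nested binary funcalls (recursive)."""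
--     if not args:
--         raise ValueError(f"Cannot fold empty argument list for {name}")
--     if len(args) == 1:
--         return args[0]
--     return f"{name}({args[0]}, {_fold_funcall(name, args[1:])})"
-- ===== Notes on version B (the rewrite author's own statement) =====
-- stated objective: alternative
-- what changed: Replaces the accumulator loop over reversed(args[:-1]) with direct structural recursion on the argument tail, building the right-nested string top-down instead of bottom-up.
import Mathlib
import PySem

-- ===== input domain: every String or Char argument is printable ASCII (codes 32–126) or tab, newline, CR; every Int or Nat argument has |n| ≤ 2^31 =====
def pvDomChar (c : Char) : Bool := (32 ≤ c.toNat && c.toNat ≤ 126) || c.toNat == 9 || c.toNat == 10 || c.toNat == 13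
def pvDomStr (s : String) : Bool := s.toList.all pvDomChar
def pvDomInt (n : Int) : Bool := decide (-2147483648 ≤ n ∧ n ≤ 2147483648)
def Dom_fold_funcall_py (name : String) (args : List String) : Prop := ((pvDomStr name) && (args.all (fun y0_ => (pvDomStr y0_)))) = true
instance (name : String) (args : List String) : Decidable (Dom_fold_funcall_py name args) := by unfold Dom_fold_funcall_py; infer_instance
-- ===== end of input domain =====

-- B rebuilds the same right-nested funcall string by direct recursion on the argument tail
-- instead of A's accumulator loop over reversed(args[:-1]); equivalence on nonempty args.

-- ===== PORT A =====
-- literal port of A: guard on empty (excluded by Pre_), single-arg short-circuit,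
-- then accumulator loop over reversed(args[:-1]) starting from args[-1]
def fold_funcall_py (name : String) (args : List String) : String :=
  if args = [] then ""  -- Python raises ValueError here; excluded by Pre_fold_funcall_py
  else if args.length = 1 then args.getD 0 ""
  else
    ((args.dropLast).reverse).foldl
      (fun result arg => name ++ "(" ++ arg ++ ", " ++ result ++ ")")
      (args.getLastD "")

-- ===== PORT B =====
-- literal port of B: structural recursion on the tail
def fold_funcall_py_alt (name : String) (args : List String) : String :=
  match args with
  | [] => ""  -- Python raises ValueError here; excluded by Pre_fold_funcall_py
  | [a] => a
  | a :: rest => name ++ "(" ++ a ++ ", " ++ fold_funcall_py_alt name rest ++ ")"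

-- ===== PRECONDITION & SPEC =====
-- Pre_ excludes only the empty argument list, on which A raises ValueError.
def Pre_fold_funcall_py (name : String) (args : List String) : Prop := args ≠ []
instance (name : String) (args : List String) : Decidable (Pre_fold_funcall_py name args) := by unfold Pre_fold_funcall_py; infer_instance
def pvWitness_fold_funcall_py : String × List String := ("f", ["x", "y", "z"])

def Spec_fold_funcall_py (name : String) (args : List String) (out : String) : Prop := out = fold_funcall_py_alt name args
instance (name : String) (args : List String) (out : String) : Decidable (Spec_fold_funcall_py name args out) := by unfold Spec_fold_funcall_py; infer_instance

-- ===== CLAIM (what is proved, stated in full; the proofs are below) =====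
def Claim_equal_fold_funcall_py : Prop := ∀ (name : String) (args : List String), Dom_fold_funcall_py name args → Pre_fold_funcall_py name args → Spec_fold_funcall_py name args (fold_funcall_py name args)

-- ===== LEMMAS AND PROOFS =====

-- A's core (the loop with its initial accumulator) agrees with B on every nonempty list;
-- note that on a singleton the loop body never runs and the core returns the element itself.
theorem fold_core_eq_alt (name : String) (a : String) (xs : List String) :
    (((a :: xs).dropLast).reverse).foldl
      (fun result arg => name ++ "(" ++ arg ++ ", " ++ result ++ ")")
      ((a :: xs).getLastD "")
    = fold_funcall_py_alt name (a :: xs) := by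
  induction xs generalizing a with
  | nil => simp [fold_funcall_py_alt]
  | cons b rs ih =>
    have h : ((a :: b :: rs).dropLast).reverse
        = ((b :: rs).dropLast).reverse ++ [a] := by
      simp [List.dropLast_cons_of_ne_nil]
    rw [h, List.foldl_append]
    have hlast : (a :: b :: rs).getLastD "" = (b :: rs).getLastD "" := by
      simp [List.getLastD_cons]
    rw [hlast, ih b]
    rfl

theorem fold_eq (name : String) (args : List String) (h : args ≠ []) :
    fold_funcall_py name args = fold_funcall_py_alt name args := by
  cases args with
  | nil => exact absurd rfl h
  | cons a xs =>
    unfold fold_funcall_py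
    rw [if_neg (by simp)]
    cases xs with
    | nil => simp [fold_funcall_py_alt]
    | cons b rs =>
      rw [if_neg (by simp)]
      exact fold_core_eq_alt name a (b :: rs)

-- ===== VERDICT (by name: the statement is the Claim_ definition above) =====
theorem fold_funcall_py_spec : Claim_equal_fold_funcall_py := by
  intro name args _ hpre
  exact fold_eq name args hpre
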